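-- pv_equiv track=rewrite | github.com/handraqui/tot-sim | tot_simulação.py | Generations
-- ===== SOURCE A (Python) =====
-- def Parents(vertex, graph):
--
--     N = len (graph)
--
--     parents = [j for j in range(N) if graph[j][vertex] == 1]
--
--     return parents
--
-- def FirstGeneration(graph):
--     return [j for j in range(len(graph)) if len(Parents(j,graph)) == 0]
--
-- def Generations(graph):
--
--     g = graph.copy()
--
--     generations = []
--
--     available = list(range(len(g)))
--
--     while len(available) != 0:
--
--         newfirst = FirstGeneration(g)
--
--         generations.append([i for i in newfirst if i in available])
--
--         available = [i for i in available if i not in newfirst]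
--
--         for i in range(len(newfirst)):
--
--             g[newfirst[i]] = [0 for _ in range(len(g))]
--
--     return generations
-- ===== SOURCE B (Python) =====
-- def Generations(graph):
--     n = len(graph)
--     indeg = [0] * n
--     for i in range(n):
--         row = graph[i]
--         for j in range(n):
--             if row[j] == 1:
--                 indeg[j] += 1
--     generations = []
--     layer = [j for j in range(n) if indeg[j] == 0]
--     while layer:
--         generations.append(layer)
--         newly = []
--         for v in layer:
--             row = graph[v]
--             for j in range(n):
--                 if row[j] == 1:
--                     indeg[j] -= 1
--                     if indeg[j] == 0:
--                         newly.append(j)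
--         layer = sorted(newly)
--     return generations
-- ===== Notes on version B (the rewrite author's own statement) =====
-- stated objective: faster
-- what changed: A rescans the whole (partially zeroed) matrix every round to recompute which vertices have no parents (O(N) full-matrix scans); B runs Kahn's algorithm: it computes all in-degrees once, then peels layers while decrementing in-degrees along the out-edges of removed vertices, sorting each newly-zeroed batch to get the ascending order A produces.
import Mathlib
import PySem

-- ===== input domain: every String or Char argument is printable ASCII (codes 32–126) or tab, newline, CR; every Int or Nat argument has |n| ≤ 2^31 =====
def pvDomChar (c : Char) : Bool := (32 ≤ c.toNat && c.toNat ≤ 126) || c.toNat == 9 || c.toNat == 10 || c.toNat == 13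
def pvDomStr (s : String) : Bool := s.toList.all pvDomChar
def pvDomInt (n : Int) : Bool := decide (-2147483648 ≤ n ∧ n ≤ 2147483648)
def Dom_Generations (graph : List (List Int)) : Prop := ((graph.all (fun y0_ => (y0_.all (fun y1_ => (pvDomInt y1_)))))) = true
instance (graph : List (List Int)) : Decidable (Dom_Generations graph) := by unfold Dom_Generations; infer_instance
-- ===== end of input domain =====

-- B replaces A's repeated full rescans of the zeroed-out matrix by Kahn's layered
-- peeling with incrementally maintained in-degrees; equal output on Pre_.

-- ===== PORT A =====
-- indexing is via the total pyGetD form: exact on Pre_ (all indices are in range there)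
def pvParents (vertex : Int) (graph : List (List Int)) : List Int :=
  (PySem.List.pyRange 0 (PySem.List.len graph) 1).filter
    (fun j => PySem.List.pyGetD (PySem.List.pyGetD graph j []) vertex 0 == 1)

def pvFirstGeneration (graph : List (List Int)) : List Int :=
  (PySem.List.pyRange 0 (PySem.List.len graph) 1).filter
    (fun j => PySem.List.len (pvParents j graph) == 0)

-- the while loop, with fuel; under Pre_ every iteration removes at least one vertex from
-- `available`, so fuel (length graph + 1) is never exhausted on admitted inputs
def pvLoopA : Nat → List (List Int) → List (List Int) → List Int → List (List Int)
  | 0, _, gens, _ => gens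
  | fuel+1, g, gens, available =>
    if PySem.List.len available ≠ 0 then
      let newfirst := pvFirstGeneration g
      let gens' := gens ++ [newfirst.filter (fun i => available.contains i)]
      let available' := available.filter (fun i => !newfirst.contains i)
      let g' := (PySem.List.pyRange 0 (PySem.List.len newfirst) 1).foldl
        (fun g'' i => PySem.List.pySetD g'' (PySem.List.pyGetD newfirst i 0)
          (List.replicate g''.length 0)) g
      pvLoopA fuel g' gens' available'
    else gens

def Generations (graph : List (List Int)) : List (List Int) :=
  pvLoopA (graph.length + 1) graph [] (PySem.List.pyRange 0 (PySem.List.len graph) 1)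

-- ===== PORT B =====
-- Kahn's algorithm: precomputed in-degrees, peel layers, decrement along out-edges,
-- collect vertices whose in-degree hits zero, sort them for the next layer
def pvLoopB (graph : List (List Int)) : Nat → List Int → List (List Int) → List Int → List (List Int)
  | 0, _, gens, _ => gens
  | fuel+1, indeg, gens, layer =>
    if layer ≠ [] then
      let st := layer.foldl (fun (st : List Int × List Int) v =>
          let row := PySem.List.pyGetD graph v []
          (PySem.List.pyRange 0 (PySem.List.len graph) 1).foldl
            (fun (st : List Int × List Int) j =>
              if PySem.List.pyGetD row j 0 == 1 then
                let ind := PySem.List.pySetD st.1 j (PySem.List.pyGetD st.1 j 0 - 1)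
                (ind, if PySem.List.pyGetD ind j 0 == 0 then st.2 ++ [j] else st.2)
              else st) st) (indeg, ([] : List Int))
      pvLoopB graph fuel st.1 (gens ++ [layer]) (PySem.List.sorted st.2 (fun x => x) false)
    else gens

def Generations_alt (graph : List (List Int)) : List (List Int) :=
  let indeg := (PySem.List.pyRange 0 (PySem.List.len graph) 1).foldl
    (fun indeg i =>
      let row := PySem.List.pyGetD graph i []
      (PySem.List.pyRange 0 (PySem.List.len graph) 1).foldl
        (fun indeg j => if PySem.List.pyGetD row j 0 == 1 then
            PySem.List.pySetD indeg j (PySem.List.pyGetD indeg j 0 + 1) else indeg) indeg)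
    (List.replicate graph.length 0)
  let layer := (PySem.List.pyRange 0 (PySem.List.len graph) 1).filter
    (fun j => PySem.List.pyGetD indeg j 0 == 0)
  pvLoopB graph (graph.length + 1) indeg [] layer

-- ===== PRECONDITION & SPEC =====
-- edge i -> j exists iff matrix entry (i,j) equals 1
def pvEdge (graph : List (List Int)) (i j : Nat) : Bool :=
  (graph.getD i []).getD j 0 == 1

-- Pre_ holds exactly where the Python A returns: every row at least as long as the matrix
-- (a shorter row raises IndexError) and the edge relation is acyclic, stated as "every
-- nonempty set of vertices contains a vertex with no in-edge from that set" (on a cyclic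
-- graph A's while loop never terminates).
def Pre_Generations (graph : List (List Int)) : Prop :=
  (∀ row ∈ graph, graph.length ≤ row.length) ∧
  ∀ S ∈ (Finset.range graph.length).powerset, S.Nonempty →
    ∃ j ∈ S, ∀ i ∈ S, pvEdge graph i j = false
instance (graph : List (List Int)) : Decidable (Pre_Generations graph) := by
  unfold Pre_Generations; infer_instance

def pvWitness_Generations : List (List Int) := [[0, 1], [0, 0]]

def Spec_Generations (graph : List (List Int)) (out : List (List Int)) : Prop := out = Generations_alt graph
instance (graph : List (List Int)) (out : List (List Int)) : Decidable (Spec_Generations graph out) := by unfold Spec_Generations; infer_instance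

-- ===== CLAIM (what is proved, stated in full; the proofs are below) =====
def Claim_equal_Generations : Prop := ∀ (graph : List (List Int)), Dom_Generations graph → Pre_Generations graph → Spec_Generations graph (Generations graph)

-- ===== LEMMAS AND PROOFS =====

-- the removed set after some rounds of peeling, and the states of both loops as functions of it
def pvDeg (g : List (List Int)) (R : Finset ℕ) (j : ℕ) : ℕ :=
  ((Finset.range g.length).filter (fun i => i ∉ R ∧ pvEdge g i j = true)).card

def pvNext (g : List (List Int)) (R : Finset ℕ) : List Int :=
  ((List.range g.length).filter (fun j => decide (j ∉ R ∧ pvDeg g R j = 0))).map (fun j : ℕ => (j : Int))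

def pvAvail (g : List (List Int)) (R : Finset ℕ) : List Int :=
  ((List.range g.length).filter (fun j => decide (j ∉ R))).map (fun j : ℕ => (j : Int))

def pvZG (g : List (List Int)) (R : Finset ℕ) : List (List Int) :=
  g.mapIdx (fun i row => if i ∈ R then List.replicate g.length 0 else row)

def pvIndeg (g : List (List Int)) (R : Finset ℕ) : List Int :=
  (List.range g.length).map (fun j : ℕ => ((pvDeg g R j : ℕ) : Int))

def pvRstep (g : List (List Int)) (R : Finset ℕ) : Finset ℕ :=
  (Finset.range g.length).filter (fun j => pvDeg g R j = 0)

-- the fold constituting one round of B's loop, named so that the invariant can speak about it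
def pvRoundFold (g : List (List Int)) (layer indeg out : List Int) : List Int × List Int :=
  layer.foldl (fun (st : List Int × List Int) v =>
      let row := PySem.List.pyGetD g v []
      (PySem.List.pyRange 0 (PySem.List.len g) 1).foldl
        (fun (st : List Int × List Int) j =>
          if PySem.List.pyGetD row j 0 == 1 then
            let ind := PySem.List.pySetD st.1 j (PySem.List.pyGetD st.1 j 0 - 1)
            (ind, if PySem.List.pyGetD ind j 0 == 0 then st.2 ++ [j] else st.2)
          else st) st) (indeg, out)

lemma pvZG_length (g : List (List Int)) (R : Finset ℕ) : (pvZG g R).length = g.length := by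
  simp [pvZG]

lemma pvDeg_mono (g : List (List Int)) {R R' : Finset ℕ} (h : R ⊆ R') (j : ℕ) :
    pvDeg g R' j ≤ pvDeg g R j := by
  apply Finset.card_le_card
  intro i hi
  simp only [Finset.mem_filter] at *
  exact ⟨hi.1, fun hm => hi.2.1 (h hm), hi.2.2⟩

lemma pvDeg_zero_of_subset (g : List (List Int)) {R R' : Finset ℕ} (h : R ⊆ R') {j : ℕ}
    (hz : pvDeg g R j = 0) : pvDeg g R' j = 0 :=
  Nat.le_zero.mp (hz ▸ pvDeg_mono g h j)

lemma pvDeg_zero_iff (g : List (List Int)) (R : Finset ℕ) (j : ℕ) :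
    pvDeg g R j = 0 ↔ ∀ i, i < g.length → i ∉ R → pvEdge g i j = false := by
  simp only [pvDeg, Finset.card_eq_zero, Finset.filter_eq_empty_iff, Finset.mem_range]
  constructor
  · intro h i hi hiR
    by_contra he
    exact h hi ⟨hiR, by simpa using he⟩
  · intro h i hi ⟨hiR, he⟩
    simp [h i hi hiR] at he

lemma pvDeg_ne_zero_of_edge (g : List (List Int)) {R : Finset ℕ} {v j : ℕ}
    (hv : v < g.length) (hvR : v ∉ R) (he : pvEdge g v j = true) : pvDeg g R j ≠ 0 := by
  intro h
  have := (pvDeg_zero_iff g R j).mp h v hv hvR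
  simp [this] at he

lemma pvDeg_insert_edge (g : List (List Int)) {T : Finset ℕ} {v j : ℕ}
    (hv : v < g.length) (hvT : v ∉ T) (he : pvEdge g v j = true) :
    pvDeg g T j = pvDeg g (insert v T) j + 1 := by
  have hmem : v ∈ (Finset.range g.length).filter (fun i => i ∉ T ∧ pvEdge g i j = true) := by
    simp [Finset.mem_filter, Finset.mem_range, hv, hvT, he]
  have hset : (Finset.range g.length).filter (fun i => i ∉ insert v T ∧ pvEdge g i j = true)
      = ((Finset.range g.length).filter (fun i => i ∉ T ∧ pvEdge g i j = true)).erase v := by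
    ext i
    simp only [Finset.mem_filter, Finset.mem_erase, Finset.mem_insert, Finset.mem_range]
    constructor
    · rintro ⟨hi, hins, hei⟩
      exact ⟨fun hiv => hins (Or.inl hiv), hi, fun hT => hins (Or.inr hT), hei⟩
    · rintro ⟨hne, hi, hT, hei⟩
      exact ⟨hi, fun hc => hc.elim hne hT, hei⟩
  unfold pvDeg
  rw [hset, Finset.card_erase_of_mem hmem]
  have := Finset.card_pos.mpr ⟨v, hmem⟩
  omega

lemma pvDeg_insert_not_edge (g : List (List Int)) {T : Finset ℕ} {v j : ℕ}
    (he : pvEdge g v j = false) : pvDeg g (insert v T) j = pvDeg g T j := by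
  unfold pvDeg
  congr 1
  ext i
  simp only [Finset.mem_filter, Finset.mem_insert, Finset.mem_range]
  constructor
  · rintro ⟨hi, hins, hei⟩
    exact ⟨hi, fun hT => hins (Or.inr hT), hei⟩
  · rintro ⟨hi, hT, hei⟩
    refine ⟨hi, fun hc => ?_, hei⟩
    rcases hc with hc | hc
    · subst hc; simp [he] at hei
    · exact hT hc

-- characterisation of FirstGeneration on the matrix with rows of R zeroed
lemma pvFirstGen_zg (g : List (List Int)) (R : Finset ℕ) :
    pvFirstGeneration (pvZG g R)
      = ((List.range g.length).filter (fun j => decide (pvDeg g R j = 0))).map (fun j : ℕ => (j : Int)) := by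
  have hn : (pvZG g R).length = g.length := pvZG_length g R
  unfold pvFirstGeneration
  rw [PySem.List.len_eq, hn, PySem.List.pyRange_zero_nat, List.filter_map]
  congr 1
  apply List.filter_congr
  intro j hj
  rw [List.mem_range] at hj
  simp only [Function.comp_apply]
  have hpar : pvParents (j : Int) (pvZG g R)
      = ((List.range g.length).filter
          (fun i => decide (i ∉ R) && pvEdge g i j)).map (fun i : ℕ => (i : Int)) := by
    unfold pvParents
    rw [PySem.List.len_eq, hn, PySem.List.pyRange_zero_nat, List.filter_map]
    congr 1
    apply List.filter_congr
    intro i hi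
    rw [List.mem_range] at hi
    simp only [Function.comp_apply]
    have hzi : PySem.List.pyGetD (pvZG g R) (i : Int) []
        = (if i ∈ R then List.replicate g.length (0 : Int) else g[i]) := by
      rw [PySem.List.pyGetD_natCast, List.getD_eq_getElem _ _ (hn ▸ hi)]
      simp [pvZG, List.getElem_mapIdx]
    rw [hzi]
    by_cases hiR : i ∈ R
    · have h0 : PySem.List.pyGetD (List.replicate g.length (0 : Int)) (j : Int) 0 = 0 := by
        rw [PySem.List.pyGetD_natCast, List.getD_eq_getElem _ _ (by simpa using hj)]
        simp
      simp [hiR, h0]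
    · have h1 : PySem.List.pyGetD (g[i]'hi) (j : Int) 0 = (g[i]'hi).getD j 0 := by
        rw [PySem.List.pyGetD_natCast]
      have h2 : pvEdge g i j = ((g[i]'hi).getD j 0 == 1) := by
        unfold pvEdge
        rw [List.getD_eq_getElem g [] hi]
      simp [hiR, h1, h2]
  rw [hpar]
  apply Bool.eq_iff_iff.mpr
  simp only [PySem.List.len_eq, List.length_map, Int.natCast_eq_zero, beq_iff_eq,
    List.length_eq_zero_iff, List.filter_eq_nil_iff, decide_eq_true_eq,
    List.mem_range, Bool.and_eq_true]
  rw [pvDeg_zero_iff]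
  constructor
  · intro h i hi hiR
    by_contra he
    exact h i hi ⟨by simpa using hiR, by simpa using he⟩
  · rintro h i hi ⟨hiR, he⟩
    rw [h i hi (by simpa using hiR)] at he
    simp at he

-- folding row-zeroing over a list of (cast) indices
lemma pvFoldSetRows (ys : List ℕ) : ∀ (g0 : List (List Int)),
    ((ys.map (fun k : ℕ => (k : Int))).foldl
      (fun g'' v => PySem.List.pySetD g'' v (List.replicate g''.length 0)) g0)
    = g0.mapIdx (fun i row => if i ∈ ys then List.replicate g0.length 0 else row) := by
  induction ys with
  | nil =>
    intro g0
    simp only [List.map_nil, List.foldl_nil]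
    apply Eq.symm
    apply List.ext_getElem (by simp)
    intro i h1 h2
    simp [List.getElem_mapIdx]
  | cons k ys ih =>
    intro g0
    rw [List.map_cons, List.foldl_cons, PySem.List.pySetD_natCast, ih]
    apply List.ext_getElem (by simp)
    intro i h1 h2
    simp only [List.getElem_mapIdx, List.length_set, List.getElem_set, List.mem_cons]
    by_cases hys : i ∈ ys
    · simp [hys]
    · by_cases hik : i = k
      · simp [hys, hik]
      · have hki : ¬ k = i := fun h => hik h.symm
        simp [hys, hik, hki]

lemma pvZero_step (g : List (List Int)) (R : Finset ℕ)
    (hR : ∀ r ∈ R, pvDeg g R r = 0) :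
    (((List.range g.length).filter (fun j => decide (pvDeg g R j = 0))).map (fun j : ℕ => (j : Int))).foldl
      (fun g'' v => PySem.List.pySetD g'' v (List.replicate g''.length 0)) (pvZG g R)
    = pvZG g (pvRstep g R) := by
  rw [pvFoldSetRows]
  apply List.ext_getElem (by simp [pvZG])
  intro i h1 h2
  have hin : i < g.length := by simpa [pvZG] using h2
  simp only [List.getElem_mapIdx, pvZG, pvRstep, List.mem_filter,
    List.mem_range, Finset.mem_filter, Finset.mem_range, decide_eq_true_eq]
  by_cases hdeg : pvDeg g R i = 0
  · simp [hin, hdeg]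
  · have hiR : i ∉ R := fun hiR => hdeg (hR i hiR)
    simp [hin, hdeg, hiR]

lemma pvAppend_step (g : List (List Int)) (R : Finset ℕ) :
    (((List.range g.length).filter (fun j => decide (pvDeg g R j = 0))).map (fun j : ℕ => (j : Int))).filter
      (fun i => (pvAvail g R).contains i) = pvNext g R := by
  rw [List.filter_map]
  unfold pvNext
  rw [List.filter_filter]
  have hfil : (List.range g.length).filter
        (fun a => ((fun i => (pvAvail g R).contains i) ∘ fun j : ℕ => (j : Int)) a
          && decide (pvDeg g R a = 0))
      = (List.range g.length).filter (fun j => decide (j ∉ R ∧ pvDeg g R j = 0)) := by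
    apply List.filter_congr
    intro j hj
    rw [List.mem_range] at hj
    apply Bool.eq_iff_iff.mpr
    simp only [Function.comp_apply, Bool.and_eq_true, decide_eq_true_eq, List.contains_eq_mem,
      pvAvail, List.mem_map, List.mem_filter, List.mem_range]
    constructor
    · rintro ⟨⟨k, ⟨hk, hkR⟩, hkj⟩, h2⟩
      have hkj' : k = j := by exact_mod_cast hkj
      subst hkj'
      exact ⟨by simpa using hkR, h2⟩
    · rintro ⟨h1, h2⟩
      exact ⟨⟨j, ⟨hj, by simpa using h1⟩, rfl⟩, h2⟩
  rw [hfil]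

lemma pvAvail_step (g : List (List Int)) (R : Finset ℕ) (hR : ∀ r ∈ R, pvDeg g R r = 0) :
    (pvAvail g R).filter
      (fun i => !(((List.range g.length).filter (fun j => decide (pvDeg g R j = 0))).map (fun j : ℕ => (j : Int))).contains i)
    = pvAvail g (pvRstep g R) := by
  unfold pvAvail
  rw [List.filter_map, List.filter_filter]
  congr 1
  apply List.filter_congr
  intro j hj
  rw [List.mem_range] at hj
  apply Bool.eq_iff_iff.mpr
  simp only [Function.comp_apply, Bool.and_eq_true, decide_eq_true_eq, Bool.not_eq_eq_eq_not,
    Bool.not_true, List.contains_eq_mem, List.mem_map, List.mem_filter, List.mem_range,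
    decide_eq_false_iff_not, pvRstep, Finset.mem_filter, Finset.mem_range]
  constructor
  · rintro ⟨hnm, hjR⟩
    intro hc
    rcases hc with ⟨_, hdeg⟩
    exact hnm ⟨j, ⟨hj, hdeg⟩, rfl⟩
  · intro h
    have hdeg : ¬ pvDeg g R j = 0 := fun hd => h ⟨hj, hd⟩
    refine ⟨?_, fun hjR => hdeg (hR j hjR)⟩
    rintro ⟨k, ⟨hk, hkdeg⟩, hkj⟩
    have hkj' : k = j := by exact_mod_cast hkj
    subst hkj'
    exact hdeg hkdeg

-- B side: hybrid in-degree state while sweeping one row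
def pvHyb (g : List (List Int)) (T : Finset ℕ) (v m : ℕ) : List Int :=
  (List.range g.length).map
    (fun j : ℕ => ((if j < m then pvDeg g (insert v T) j else pvDeg g T j : ℕ) : Int))

lemma pvHyb_zero (g : List (List Int)) (T : Finset ℕ) (v : ℕ) :
    pvIndeg g T = pvHyb g T v 0 := by
  unfold pvIndeg pvHyb
  apply List.map_congr_left
  intro j _
  simp

lemma pvInnerB_aux (g : List (List Int)) (T : Finset ℕ) (v : ℕ)
    (hv : v < g.length) (hvT : v ∉ T) (out : List Int) :
    ∀ m, m ≤ g.length →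
    (((List.range m).map (fun k : ℕ => (k : Int))).foldl
      (fun (st : List Int × List Int) j =>
        if PySem.List.pyGetD (PySem.List.pyGetD g (v : Int) []) j 0 == 1 then
          let ind := PySem.List.pySetD st.1 j (PySem.List.pyGetD st.1 j 0 - 1)
          (ind, if PySem.List.pyGetD ind j 0 == 0 then st.2 ++ [j] else st.2)
        else st) (pvHyb g T v 0, out))
    = (pvHyb g T v m, out ++ ((List.range m).filter
        (fun j => pvEdge g v j && decide (pvDeg g (insert v T) j = 0))).map (fun j : ℕ => (j : Int))) := by
  intro m
  induction m with
  | zero => intro _; simp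
  | succ m ih =>
    intro hm
    have hmn : m < g.length := by omega
    rw [List.range_succ, List.map_append, List.foldl_append, ih (by omega),
      List.filter_append, List.map_append, ← List.append_assoc]
    simp only [List.map_cons, List.map_nil, List.foldl_cons, List.foldl_nil]
    have htest : (PySem.List.pyGetD (PySem.List.pyGetD g (v : Int) []) ((m : ℕ) : Int) 0 == 1)
        = pvEdge g v m := by
      rw [PySem.List.pyGetD_natCast, PySem.List.pyGetD_natCast]
      rfl
    have hget : PySem.List.pyGetD (pvHyb g T v m) ((m : ℕ) : Int) 0 = ((pvDeg g T m : ℕ) : Int) := by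
      rw [PySem.List.pyGetD_natCast]
      unfold pvHyb
      rw [PySem.List.getD_map_range _ _ _ _ hmn]
      simp
    by_cases he : pvEdge g v m = true
    · have hdec := pvDeg_insert_edge g hv hvT he
      have hval : ((pvDeg g T m : ℕ) : Int) - 1 = ((pvDeg g (insert v T) m : ℕ) : Int) := by
        rw [hdec]; push_cast; ring
      have hset : PySem.List.pySetD (pvHyb g T v m) ((m : ℕ) : Int) (((pvDeg g T m : ℕ) : Int) - 1)
          = pvHyb g T v (m + 1) := by
        rw [PySem.List.pySetD_natCast, hval]
        apply List.ext_getElem (by simp [pvHyb])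
        intro i h1 h2
        have hi : i < g.length := by simpa [pvHyb] using h2
        simp only [pvHyb, List.getElem_set, List.getElem_map, List.getElem_range]
        by_cases him : m = i
        · subst him; simp
        · have hiff : i < m ↔ i < m + 1 := by omega
          simp [him, hiff]
      have hget2 : PySem.List.pyGetD (pvHyb g T v (m + 1)) ((m : ℕ) : Int) 0
          = ((pvDeg g (insert v T) m : ℕ) : Int) := by
        rw [PySem.List.pyGetD_natCast]
        unfold pvHyb
        rw [PySem.List.getD_map_range _ _ _ _ hmn]
        simp
      simp only [htest, he, if_true, hget, hset, hget2]
      by_cases hz : pvDeg g (insert v T) m = 0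
      · simp [hz, he, List.filter_cons]
      · have hz' : ((pvDeg g (insert v T) m : ℕ) : Int) ≠ 0 := by exact_mod_cast hz
        simp [hz, hz', he, List.filter_cons]
    · have he' : pvEdge g v m = false := by simpa using he
      have hstab : pvHyb g T v (m + 1) = pvHyb g T v m := by
        unfold pvHyb
        apply List.map_congr_left
        intro j _
        by_cases hjm : j = m
        · subst hjm; simp [pvDeg_insert_not_edge g he']
        · have hiff : j < m + 1 ↔ j < m := by omega
          simp [hiff]
      simp only [htest, he', Bool.false_eq_true, if_false, hstab]
      simp [List.filter_cons, he']

lemma pvInnerB (g : List (List Int)) (T : Finset ℕ) (v : ℕ)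
    (hv : v < g.length) (hvT : v ∉ T) (out : List Int) :
    ((PySem.List.pyRange 0 (PySem.List.len g) 1).foldl
      (fun (st : List Int × List Int) j =>
        if PySem.List.pyGetD (PySem.List.pyGetD g (v : Int) []) j 0 == 1 then
          let ind := PySem.List.pySetD st.1 j (PySem.List.pyGetD st.1 j 0 - 1)
          (ind, if PySem.List.pyGetD ind j 0 == 0 then st.2 ++ [j] else st.2)
        else st) (pvIndeg g T, out))
    = (pvIndeg g (insert v T),
       out ++ ((List.range g.length).filter
          (fun j => pvEdge g v j && decide (pvDeg g (insert v T) j = 0))).map (fun j : ℕ => (j : Int))) := by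
  have hfin : pvHyb g T v g.length = pvIndeg g (insert v T) := by
    unfold pvHyb pvIndeg
    apply List.map_congr_left
    intro j hj
    rw [List.mem_range] at hj
    simp [hj]
  rw [PySem.List.len_eq, PySem.List.pyRange_zero_nat, pvHyb_zero g T v,
    pvInnerB_aux g T v hv hvT out g.length (le_refl _), hfin]

lemma pvOuterB (g : List (List Int)) (R : Finset ℕ) (ys : List ℕ) :
    ∀ (T : Finset ℕ) (out : List Int), ys.Nodup →
    (∀ y ∈ ys, y < g.length ∧ y ∉ T) → R ⊆ T →
    (∀ x, x ∈ out ↔ ∃ j, j < g.length ∧ x = (j : Int) ∧ pvDeg g T j = 0 ∧ pvDeg g R j ≠ 0) →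
    out.Nodup →
    ((pvRoundFold g (ys.map (fun k : ℕ => (k : Int))) (pvIndeg g T) out).1
        = pvIndeg g (T ∪ ys.toFinset))
    ∧ (∀ x, x ∈ (pvRoundFold g (ys.map (fun k : ℕ => (k : Int))) (pvIndeg g T) out).2
        ↔ ∃ j, j < g.length ∧ x = (j : Int) ∧ pvDeg g (T ∪ ys.toFinset) j = 0 ∧ pvDeg g R j ≠ 0)
    ∧ (pvRoundFold g (ys.map (fun k : ℕ => (k : Int))) (pvIndeg g T) out).2.Nodup := by
  induction ys with
  | nil =>
    intro T out _ _ _ hout hnd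
    refine ⟨by simp [pvRoundFold], ?_, by simpa [pvRoundFold] using hnd⟩
    intro x
    simp only [pvRoundFold, List.map_nil, List.foldl_nil]
    simpa using hout x
  | cons v ys ih =>
    intro T out hnd hys hRT hout hndout
    have hv : v < g.length := (hys v List.mem_cons_self).1
    have hvT : v ∉ T := (hys v List.mem_cons_self).2
    have hvR : v ∉ R := fun hm => hvT (hRT hm)
    obtain ⟨hvys, hndys⟩ := List.nodup_cons.mp hnd
    have hred : pvRoundFold g ((v :: ys).map (fun k : ℕ => (k : Int))) (pvIndeg g T) out
        = pvRoundFold g (ys.map (fun k : ℕ => (k : Int))) (pvIndeg g (insert v T))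
            (out ++ ((List.range g.length).filter
              (fun j => pvEdge g v j && decide (pvDeg g (insert v T) j = 0))).map (fun j : ℕ => (j : Int))) := by
      unfold pvRoundFold
      rw [List.map_cons, List.foldl_cons]
      congr 1
      exact pvInnerB g T v hv hvT out
    rw [hred]
    set out' := out ++ ((List.range g.length).filter
        (fun j => pvEdge g v j && decide (pvDeg g (insert v T) j = 0))).map (fun j : ℕ => (j : Int)) with hout'def
    have hnew_mem : ∀ x : Int, (x ∈ ((List.range g.length).filter
        (fun j => pvEdge g v j && decide (pvDeg g (insert v T) j = 0))).map (fun j : ℕ => (j : Int)))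
        ↔ ∃ j, j < g.length ∧ x = (j : Int) ∧ pvEdge g v j = true ∧ pvDeg g (insert v T) j = 0 := by
      intro x
      simp only [List.mem_map, List.mem_filter, List.mem_range, Bool.and_eq_true, decide_eq_true_eq]
      constructor
      · rintro ⟨j, ⟨hj, he, hz⟩, hx⟩
        exact ⟨j, hj, hx.symm, he, hz⟩
      · rintro ⟨j, hj, hx, he, hz⟩
        exact ⟨j, ⟨hj, he, hz⟩, hx.symm⟩
    have hmem' : ∀ x, x ∈ out' ↔ ∃ j, j < g.length ∧ x = (j : Int)
        ∧ pvDeg g (insert v T) j = 0 ∧ pvDeg g R j ≠ 0 := by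
      intro x
      rw [hout'def, List.mem_append, hout x, hnew_mem x]
      constructor
      · rintro (⟨j, hj, hx, hd0, hdR⟩ | ⟨j, hj, hx, he, hz⟩)
        · exact ⟨j, hj, hx, pvDeg_zero_of_subset g (Finset.subset_insert v T) hd0, hdR⟩
        · exact ⟨j, hj, hx, hz, pvDeg_ne_zero_of_edge g hv hvR he⟩
      · rintro ⟨j, hj, hx, hd0, hdR⟩
        by_cases hTj : pvDeg g T j = 0
        · exact Or.inl ⟨j, hj, hx, hTj, hdR⟩
        · refine Or.inr ⟨j, hj, hx, ?_, hd0⟩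
          by_contra hne
          have hne' : pvEdge g v j = false := by simpa using hne
          exact hTj (by rw [← pvDeg_insert_not_edge g hne']; exact hd0)
    have hnd' : out'.Nodup := by
      rw [hout'def, List.nodup_append]
      refine ⟨hndout, ((List.nodup_range).filter _).map Nat.cast_injective, ?_⟩
      intro a ha b hb
      obtain ⟨j, hj, hxa, hd0, _⟩ := (hout a).mp ha
      obtain ⟨j', hj', hxb, he', hz'⟩ := (hnew_mem b).mp hb
      intro hab
      rw [hab, hxb] at hxa
      have hjj : j' = j := by exact_mod_cast hxa
      subst hjj
      exact pvDeg_ne_zero_of_edge g hv hvT he' hd0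
    have hys' : ∀ y ∈ ys, y < g.length ∧ y ∉ insert v T := by
      intro y hy
      refine ⟨(hys y (List.mem_cons_of_mem v hy)).1, ?_⟩
      rw [Finset.mem_insert]
      rintro (h | h)
      · exact hvys (h ▸ hy)
      · exact (hys y (List.mem_cons_of_mem v hy)).2 h
    have hRT' : R ⊆ insert v T := hRT.trans (Finset.subset_insert v T)
    obtain ⟨ih1, ih2, ih3⟩ := ih (insert v T) out' hndys hys' hRT' hmem' hnd'
    have huni : insert v T ∪ ys.toFinset = T ∪ (v :: ys).toFinset := by
      rw [List.toFinset_cons, Finset.insert_union, Finset.union_insert]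
    rw [huni] at ih1 ih2
    exact ⟨ih1, ih2, ih3⟩

lemma pvNext_nodup (g : List (List Int)) (R : Finset ℕ) : (pvNext g R).Nodup :=
  ((List.nodup_range).filter _).map Nat.cast_injective

lemma pvNext_pairwise (g : List (List Int)) (R : Finset ℕ) :
    (pvNext g R).Pairwise (fun a b : Int => a < b) := by
  unfold pvNext
  rw [List.pairwise_map]
  exact ((List.pairwise_lt_range).filter _).imp (fun h => by exact_mod_cast h)

lemma pvRstep_subset (g : List (List Int)) (R : Finset ℕ) :
    pvRstep g R ⊆ Finset.range g.length := Finset.filter_subset _ _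

lemma pvR_subset_Rstep (g : List (List Int)) (R : Finset ℕ)
    (hRn : R ⊆ Finset.range g.length) (hR : ∀ r ∈ R, pvDeg g R r = 0) :
    R ⊆ pvRstep g R := by
  intro r hr
  simp only [pvRstep, Finset.mem_filter]
  exact ⟨hRn hr, hR r hr⟩

lemma pvRstep_deg_zero (g : List (List Int)) (R : Finset ℕ)
    (hRn : R ⊆ Finset.range g.length) (hR : ∀ r ∈ R, pvDeg g R r = 0) :
    ∀ r ∈ pvRstep g R, pvDeg g (pvRstep g R) r = 0 := by
  intro r hr
  simp only [pvRstep, Finset.mem_filter] at hr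
  exact pvDeg_zero_of_subset g (pvR_subset_Rstep g R hRn hR) hr.2

lemma pvRound_step (g : List (List Int)) (R : Finset ℕ)
    (hRn : R ⊆ Finset.range g.length) (hR : ∀ r ∈ R, pvDeg g R r = 0) :
    (pvRoundFold g (pvNext g R) (pvIndeg g R) []).1 = pvIndeg g (pvRstep g R)
    ∧ PySem.List.sorted (pvRoundFold g (pvNext g R) (pvIndeg g R) []).2 (fun x => x) false
      = pvNext g (pvRstep g R) := by
  have hpn : pvNext g R = ((List.range g.length).filter
      (fun j => decide (j ∉ R ∧ pvDeg g R j = 0))).map (fun j : ℕ => (j : Int)) := rfl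
  have hys : ∀ y ∈ (List.range g.length).filter (fun j => decide (j ∉ R ∧ pvDeg g R j = 0)),
      y < g.length ∧ y ∉ R := by
    intro y hy
    simp only [List.mem_filter, List.mem_range, decide_eq_true_eq] at hy
    exact ⟨hy.1, hy.2.1⟩
  have hout0 : ∀ x : Int, x ∈ ([] : List Int) ↔ ∃ j, j < g.length ∧ x = (j : Int)
      ∧ pvDeg g R j = 0 ∧ pvDeg g R j ≠ 0 := by
    intro x
    constructor
    · intro h; exact absurd h (List.not_mem_nil)
    · rintro ⟨j, _, _, hd0, hne⟩; exact (hne hd0).elim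
  obtain ⟨h1, h2, h3⟩ := pvOuterB g R
    ((List.range g.length).filter (fun j => decide (j ∉ R ∧ pvDeg g R j = 0))) R []
    ((List.nodup_range).filter _) hys (Finset.Subset.refl R) hout0 List.nodup_nil
  have hTU : R ∪ ((List.range g.length).filter
      (fun j => decide (j ∉ R ∧ pvDeg g R j = 0))).toFinset = pvRstep g R := by
    ext j
    simp only [Finset.mem_union, List.mem_toFinset, List.mem_filter, List.mem_range,
      decide_eq_true_eq, pvRstep, Finset.mem_filter, Finset.mem_range]
    constructor
    · rintro (hj | ⟨hj, _, hd⟩)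
      · exact ⟨Finset.mem_range.mp (hRn hj), hR j hj⟩
      · exact ⟨hj, hd⟩
    · rintro ⟨hj, hd⟩
      by_cases hjR : j ∈ R
      · exact Or.inl hjR
      · exact Or.inr ⟨hj, hjR, hd⟩
  rw [hTU] at h1 h2
  constructor
  · rw [hpn, h1]
  · rw [hpn]
    apply PySem.List.sorted_eq_of_perm_of_pairwise_lt
    · rw [List.perm_ext_iff_of_nodup (pvNext_nodup g (pvRstep g R)) h3]
      intro x
      rw [h2 x]
      simp only [pvNext, List.mem_map, List.mem_filter, List.mem_range, decide_eq_true_eq,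
        pvRstep, Finset.mem_filter, Finset.mem_range]
      constructor
      · rintro ⟨j, ⟨hj, hjR', hd'⟩, hx⟩
        refine ⟨j, hj, hx.symm, hd', ?_⟩
        intro hd
        exact hjR' ⟨hj, hd⟩
      · rintro ⟨j, hj, hx, hd', hdne⟩
        refine ⟨j, ⟨hj, ?_, hd'⟩, hx.symm⟩
        rintro ⟨_, hd⟩
        exact hdne hd
    · exact pvNext_pairwise g (pvRstep g R)

lemma pvLoop_eq (g : List (List Int))
    (hacyc : ∀ S ∈ (Finset.range g.length).powerset, S.Nonempty →
      ∃ j ∈ S, ∀ i ∈ S, pvEdge g i j = false) :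
    ∀ (fuel : Nat) (R : Finset ℕ) (gens : List (List Int)),
      R ⊆ Finset.range g.length → (∀ r ∈ R, pvDeg g R r = 0) →
      (pvAvail g R).length < fuel →
      pvLoopA fuel (pvZG g R) gens (pvAvail g R) = pvLoopB g fuel (pvIndeg g R) gens (pvNext g R) := by
  intro fuel
  induction fuel with
  | zero => intro R gens _ _ h; omega
  | succ fuel ih =>
    intro R gens hRn hR hlen
    by_cases hav : pvAvail g R = []
    · have hnil : pvNext g R = [] := by
        unfold pvNext
        rw [List.map_eq_nil_iff, List.filter_eq_nil_iff]
        intro j hj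
        rw [List.mem_range] at hj
        simp only [decide_eq_true_eq, not_and]
        intro hjR
        exfalso
        have hxm : (j : Int) ∉ pvAvail g R := by rw [hav]; exact List.not_mem_nil
        apply hxm
        unfold pvAvail
        simp only [List.mem_map, List.mem_filter, List.mem_range]
        exact ⟨j, ⟨hj, by simpa using hjR⟩, rfl⟩
      rw [hav, hnil]
      simp [pvLoopA, pvLoopB]
    · have hcond : PySem.List.len (pvAvail g R) ≠ 0 := by
        rw [PySem.List.len_eq]
        simpa [List.length_eq_zero_iff] using hav
      obtain ⟨x0, hx0⟩ := List.exists_mem_of_ne_nil _ hav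
      obtain ⟨j0, hj0m, hj0x⟩ := List.mem_map.mp hx0
      have hj0range : j0 < g.length ∧ j0 ∉ R := by
        simpa using List.mem_filter.mp hj0m
      obtain ⟨j1, hj1S, hj1src⟩ := hacyc ((Finset.range g.length).filter (fun j => j ∉ R))
        (Finset.mem_powerset.mpr (Finset.filter_subset _ _))
        ⟨j0, by simp [Finset.mem_filter, Finset.mem_range, hj0range.1, hj0range.2]⟩
      have hj1 : j1 < g.length ∧ j1 ∉ R := by simpa using hj1S
      have hj1deg : pvDeg g R j1 = 0 := by
        rw [pvDeg_zero_iff]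
        intro i hi hiR
        exact hj1src i (by simp [Finset.mem_filter, Finset.mem_range, hi, hiR])
      have hnext : pvNext g R ≠ [] := by
        apply List.ne_nil_of_mem (a := ((j1 : ℕ) : Int))
        unfold pvNext
        simp only [List.mem_map, List.mem_filter, List.mem_range, decide_eq_true_eq]
        exact ⟨j1, ⟨hj1.1, hj1.2, hj1deg⟩, rfl⟩
      rw [show pvLoopA (fuel + 1) (pvZG g R) gens (pvAvail g R)
          = if PySem.List.len (pvAvail g R) ≠ 0 then
              pvLoopA fuel
                ((PySem.List.pyRange 0 (PySem.List.len (pvFirstGeneration (pvZG g R))) 1).foldl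
                  (fun g'' i => PySem.List.pySetD g'' (PySem.List.pyGetD (pvFirstGeneration (pvZG g R)) i 0)
                    (List.replicate g''.length 0)) (pvZG g R))
                (gens ++ [(pvFirstGeneration (pvZG g R)).filter (fun i => (pvAvail g R).contains i)])
                ((pvAvail g R).filter (fun i => !(pvFirstGeneration (pvZG g R)).contains i))
            else gens from rfl]
      rw [if_pos hcond]
      rw [show pvLoopB g (fuel + 1) (pvIndeg g R) gens (pvNext g R)
          = if pvNext g R ≠ [] then
              pvLoopB g fuel (pvRoundFold g (pvNext g R) (pvIndeg g R) []).1
                (gens ++ [pvNext g R])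
                (PySem.List.sorted (pvRoundFold g (pvNext g R) (pvIndeg g R) []).2 (fun x => x) false)
            else gens from rfl]
      rw [if_pos hnext]
      obtain ⟨hr1, hr2⟩ := pvRound_step g R hRn hR
      rw [hr1, hr2]
      rw [pvFirstGen_zg g R, pvAppend_step g R, pvAvail_step g R hR]
      have hzero : ((PySem.List.pyRange 0 (PySem.List.len
            (((List.range g.length).filter (fun j => decide (pvDeg g R j = 0))).map (fun j : ℕ => (j : Int)))) 1).foldl
          (fun g'' i => PySem.List.pySetD g''
            (PySem.List.pyGetD (((List.range g.length).filter (fun j => decide (pvDeg g R j = 0))).map (fun j : ℕ => (j : Int))) i 0)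
            (List.replicate g''.length 0)) (pvZG g R))
          = (((List.range g.length).filter (fun j => decide (pvDeg g R j = 0))).map (fun j : ℕ => (j : Int))).foldl
            (fun g'' v => PySem.List.pySetD g'' v (List.replicate g''.length 0)) (pvZG g R) :=
        PySem.List.foldl_pyRange_zero_pyGetD
          (((List.range g.length).filter (fun j => decide (pvDeg g R j = 0))).map (fun j : ℕ => (j : Int)))
          (0 : Int) (fun g'' v => PySem.List.pySetD g'' v (List.replicate g''.length 0)) (pvZG g R)
      rw [hzero, pvZero_step g R hR]
      have hmono : ((List.range g.length).filter (fun j => decide (j ∉ pvRstep g R))).Sublist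
          ((List.range g.length).filter (fun j => decide (j ∉ R))) := by
        apply List.monotone_filter_right
        intro a ha
        simp only [decide_eq_true_eq] at *
        intro haR
        exact ha (pvR_subset_Rstep g R hRn hR haR)
      have hnefil : ((List.range g.length).filter (fun j => decide (j ∉ pvRstep g R)))
          ≠ ((List.range g.length).filter (fun j => decide (j ∉ R))) := by
        intro heq
        have hmem1 : j1 ∈ (List.range g.length).filter (fun j => decide (j ∉ R)) := by
          simp [List.mem_filter, List.mem_range, hj1.1, hj1.2]
        have hmem2 : j1 ∉ (List.range g.length).filter (fun j => decide (j ∉ pvRstep g R)) := by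
          simp only [List.mem_filter, List.mem_range, decide_eq_true_eq, not_and]
          intro _
          simp only [not_not, pvRstep, Finset.mem_filter, Finset.mem_range]
          exact ⟨hj1.1, hj1deg⟩
        rw [heq] at hmem2
        exact hmem2 hmem1
      have hlt : (pvAvail g (pvRstep g R)).length < (pvAvail g R).length := by
        unfold pvAvail
        rw [List.length_map, List.length_map]
        exact Nat.lt_of_le_of_ne hmono.length_le (fun heq => hnefil (hmono.eq_of_length heq))
      exact ih (pvRstep g R) (gens ++ [pvNext g R]) (pvRstep_subset g R)
        (pvRstep_deg_zero g R hRn hR) (by omega)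

-- entry-point equalities
lemma pvZG_empty (g : List (List Int)) : pvZG g ∅ = g := by
  apply List.ext_getElem (by simp [pvZG])
  intro i h1 h2
  simp [pvZG, List.getElem_mapIdx]

lemma pvAvail_empty (g : List (List Int)) :
    pvAvail g ∅ = PySem.List.pyRange 0 (PySem.List.len g) 1 := by
  rw [PySem.List.len_eq, PySem.List.pyRange_zero_nat]
  unfold pvAvail
  simp

def pvCnt (g : List (List Int)) (m j : ℕ) : ℕ :=
  ((Finset.range m).filter (fun i => pvEdge g i j = true)).card

lemma pvCnt_succ (g : List (List Int)) (m j : ℕ) :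
    pvCnt g (m + 1) j = pvCnt g m j + if pvEdge g m j then 1 else 0 := by
  unfold pvCnt
  have hr : Finset.range (m + 1) = insert m (Finset.range m) := by
    ext x
    simp only [Finset.mem_insert, Finset.mem_range]
    omega
  rw [hr, Finset.filter_insert]
  by_cases he : pvEdge g m j = true
  · have hnm : m ∉ (Finset.range m).filter (fun i => pvEdge g i j = true) :=
      fun hmem => absurd (Finset.mem_range.mp (Finset.mem_filter.mp hmem).1) (lt_irrefl m)
    simp [he, Finset.card_insert_of_notMem hnm]
  · simp [he]

lemma pvInnerInc (g : List (List Int)) (v : ℕ) (c : ℕ → ℕ) :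
    (((List.range g.length).map (fun k : ℕ => (k : Int))).foldl
      (fun indeg j => if PySem.List.pyGetD (PySem.List.pyGetD g (v : Int) []) j 0 == 1 then
          PySem.List.pySetD indeg j (PySem.List.pyGetD indeg j 0 + 1) else indeg)
      ((List.range g.length).map (fun j : ℕ => ((c j : ℕ) : Int))))
    = (List.range g.length).map (fun j : ℕ => ((c j + (if pvEdge g v j then 1 else 0) : ℕ) : Int)) := by
  suffices h : ∀ m, m ≤ g.length →
      (((List.range m).map (fun k : ℕ => (k : Int))).foldl
        (fun indeg j => if PySem.List.pyGetD (PySem.List.pyGetD g (v : Int) []) j 0 == 1 then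
            PySem.List.pySetD indeg j (PySem.List.pyGetD indeg j 0 + 1) else indeg)
        ((List.range g.length).map (fun j : ℕ => ((c j : ℕ) : Int))))
      = (List.range g.length).map
          (fun j : ℕ => ((c j + (if j < m ∧ pvEdge g v j then 1 else 0) : ℕ) : Int)) by
    rw [h g.length (le_refl _)]
    apply List.map_congr_left
    intro j hj
    rw [List.mem_range] at hj
    simp [hj]
  intro m
  induction m with
  | zero =>
    intro _
    simp
  | succ m ihm =>
    intro hm
    have hmn : m < g.length := by omega
    rw [List.range_succ, List.map_append, List.foldl_append, ihm (by omega)]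
    simp only [List.map_cons, List.map_nil, List.foldl_cons, List.foldl_nil]
    have htest : (PySem.List.pyGetD (PySem.List.pyGetD g (v : Int) []) ((m : ℕ) : Int) 0 == 1)
        = pvEdge g v m := by
      rw [PySem.List.pyGetD_natCast, PySem.List.pyGetD_natCast]
      rfl
    by_cases he : pvEdge g v m = true
    · have hget : PySem.List.pyGetD ((List.range g.length).map
          (fun j : ℕ => ((c j + (if j < m ∧ pvEdge g v j then 1 else 0) : ℕ) : Int))) ((m : ℕ) : Int) 0
          = ((c m : ℕ) : Int) := by
        rw [PySem.List.pyGetD_natCast, PySem.List.getD_map_range _ _ _ _ hmn]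
        simp
      simp only [htest, he, if_true, hget, PySem.List.pySetD_natCast]
      apply List.ext_getElem (by simp)
      intro i h1 h2
      have hi : i < g.length := by simpa using h2
      simp only [List.getElem_set, List.getElem_map, List.getElem_range]
      by_cases him : m = i
      · subst him
        simp [he]
      · have hiff : i < m ↔ i < m + 1 := by omega
        simp [him, hiff]
    · have he' : pvEdge g v m = false := by simpa using he
      simp only [htest, he', Bool.false_eq_true, if_false]
      apply List.map_congr_left
      intro j _
      by_cases hjm : j = m
      · subst hjm; simp [he']
      · have hiff : j < m + 1 ↔ j < m := by omega
        simp [hiff]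

lemma pvCnt_full (g : List (List Int)) (j : ℕ) : pvCnt g g.length j = pvDeg g ∅ j := by
  unfold pvCnt pvDeg
  congr 1
  apply Finset.filter_congr
  intro i _
  simp

lemma pvIndeg0_eq (g : List (List Int)) :
    ((PySem.List.pyRange 0 (PySem.List.len g) 1).foldl
      (fun indeg i =>
        let row := PySem.List.pyGetD g i []
        (PySem.List.pyRange 0 (PySem.List.len g) 1).foldl
          (fun indeg j => if PySem.List.pyGetD row j 0 == 1 then
              PySem.List.pySetD indeg j (PySem.List.pyGetD indeg j 0 + 1) else indeg) indeg)
      (List.replicate g.length 0)) = pvIndeg g ∅ := by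
  rw [PySem.List.len_eq, PySem.List.pyRange_zero_nat]
  suffices h : ∀ m, m ≤ g.length →
      (((List.range m).map (fun k : ℕ => (k : Int))).foldl
        (fun indeg i =>
          let row := PySem.List.pyGetD g i []
          ((List.range g.length).map (fun k : ℕ => (k : Int))).foldl
            (fun indeg j => if PySem.List.pyGetD row j 0 == 1 then
                PySem.List.pySetD indeg j (PySem.List.pyGetD indeg j 0 + 1) else indeg) indeg)
        (List.replicate g.length 0))
      = (List.range g.length).map (fun j : ℕ => ((pvCnt g m j : ℕ) : Int)) by
    rw [h g.length (le_refl _)]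
    unfold pvIndeg
    apply List.map_congr_left
    intro j _
    rw [pvCnt_full]
  intro m
  induction m with
  | zero =>
    intro _
    simp only [List.range_zero, List.map_nil, List.foldl_nil]
    apply List.ext_getElem (by simp)
    intro i h1 h2
    have hi : i < g.length := by simpa using h1
    simp [pvCnt]
  | succ m ihm =>
    intro hm
    rw [List.range_succ, List.map_append, List.foldl_append, ihm (by omega)]
    simp only [List.map_cons, List.map_nil, List.foldl_cons, List.foldl_nil]
    have hstep : (((List.range g.length).map (fun k : ℕ => (k : Int))).foldl
          (fun indeg j => if PySem.List.pyGetD (PySem.List.pyGetD g ((m : ℕ) : Int) []) j 0 == 1 then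
              PySem.List.pySetD indeg j (PySem.List.pyGetD indeg j 0 + 1) else indeg)
          ((List.range g.length).map (fun j : ℕ => ((pvCnt g m j : ℕ) : Int))))
        = (List.range g.length).map
            (fun j : ℕ => ((pvCnt g m j + (if pvEdge g m j then 1 else 0) : ℕ) : Int)) :=
      pvInnerInc g m (fun j => pvCnt g m j)
    rw [hstep]
    apply List.map_congr_left
    intro j _
    rw [pvCnt_succ]

lemma pvLayer0_eq (g : List (List Int)) :
    (PySem.List.pyRange 0 (PySem.List.len g) 1).filter
      (fun j => PySem.List.pyGetD (pvIndeg g ∅) j 0 == 0) = pvNext g ∅ := by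
  rw [PySem.List.len_eq, PySem.List.pyRange_zero_nat, List.filter_map]
  unfold pvNext
  have hfil : (List.range g.length).filter
        ((fun j => PySem.List.pyGetD (pvIndeg g ∅) j 0 == 0) ∘ (fun j : ℕ => (j : Int)))
      = (List.range g.length).filter (fun j => decide (j ∉ (∅ : Finset ℕ) ∧ pvDeg g ∅ j = 0)) := by
    apply List.filter_congr
    intro j hj
    rw [List.mem_range] at hj
    have hg : PySem.List.pyGetD (pvIndeg g ∅) (j : Int) 0 = ((pvDeg g ∅ j : ℕ) : Int) := by
      rw [PySem.List.pyGetD_natCast]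
      unfold pvIndeg
      rw [PySem.List.getD_map_range _ _ _ _ hj]
    apply Bool.eq_iff_iff.mpr
    simp [Function.comp_apply, hg, Int.natCast_eq_zero]
  rw [hfil]

-- ===== VERDICT (by name: the statement is the Claim_ definition above) =====
theorem Generations_spec : Claim_equal_Generations := by
  intro graph _hdom hpre
  obtain ⟨hsq, hacyc⟩ := hpre
  simp only [Spec_Generations, Generations, Generations_alt]
  rw [pvIndeg0_eq graph, pvLayer0_eq graph]
  have h5 := pvLoop_eq graph hacyc (graph.length + 1) ∅ [] (by simp) (by simp)
    (by
      unfold pvAvail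
      rw [List.length_map]
      have hle := List.length_filter_le (fun j => decide (j ∉ (∅ : Finset ℕ))) (List.range graph.length)
      simp only [List.length_range] at hle
      omega)
  rw [← h5, pvZG_empty graph, pvAvail_empty graph]
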